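-- pv_equiv track=rewrite | github.com/LibenHailu/interview-prep | contest/A2SV-G3_(Div1+Div2+Div3)_Contest_#_1/B. Move Brackets.py | solution
-- ===== SOURCE A (Python) =====
-- def solution(brackets):
--     stack = []
--     for c in brackets:
--         if not stack:
--             stack.append(c)
--         elif stack and c == ")" and stack[-1] == "(":
--             stack.pop()
--         else:
--             stack.append(c)
--
--     return len(stack)//2
-- ===== SOURCE B (Python) =====
-- def solution(brackets):
--     s = brackets
--     while "()" in s:
--         s = s.replace("()", "")
--     return len(s) // 2
-- ===== Notes on version B (the rewrite author's own statement) =====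
-- stated objective: alternative
-- what changed: Replaces the one-pass explicit stack with fixpoint string rewriting: repeatedly delete every '()' substring with str.replace until none remains, then return half the length of the normal form.
import Mathlib
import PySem

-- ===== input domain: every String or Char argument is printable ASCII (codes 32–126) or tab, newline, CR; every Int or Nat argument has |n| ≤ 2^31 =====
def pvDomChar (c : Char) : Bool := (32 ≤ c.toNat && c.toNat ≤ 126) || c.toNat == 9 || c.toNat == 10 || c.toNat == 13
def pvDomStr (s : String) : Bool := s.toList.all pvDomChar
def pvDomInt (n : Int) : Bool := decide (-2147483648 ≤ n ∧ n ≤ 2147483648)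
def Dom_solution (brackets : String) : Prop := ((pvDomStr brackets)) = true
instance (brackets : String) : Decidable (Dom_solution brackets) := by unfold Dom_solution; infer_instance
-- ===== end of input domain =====

-- B replaces A's explicit one-pass stack by fixpoint string rewriting: repeatedly delete
-- "()" substrings until none remains, then halve the remaining length.


-- ===== PORT A =====
-- one step of A's loop body: push, or pop when c = ')' and the top is '('
def solutionStep (stack : List Char) (c : Char) : List Char :=
  if stack = [] then stack ++ [c]
  else if ¬ stack = [] ∧ c = ')' ∧ stack.getLast? = some '(' then stack.dropLast
  else stack ++ [c]

def solution (brackets : String) : Int :=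
  let stack := brackets.toList.foldl solutionStep []
  PySem.Int.floordiv (stack.length : Int) 2

-- ===== PORT B =====
-- Termination helpers for B's while-loop, cited by name in its decreasing_by:
-- pvStrip characterises one s.replace("()", "") pass, and its length strictly drops
-- whenever "()" occurs.
def pvStrip : List Char → List Char
  | [] => []
  | [c] => [c]
  | c :: d :: t => if c = '(' ∧ d = ')' then pvStrip t else c :: pvStrip (d :: t)

theorem pvStrip_length_le (l : List Char) : (pvStrip l).length ≤ l.length := by
  induction l using pvStrip.induct with
  | case1 => simp [pvStrip]
  | case2 c => simp [pvStrip]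
  | case3 c d t h ih => simp [pvStrip, h]; omega
  | case4 c d t h ih => simp [pvStrip, h]; simpa using ih

theorem replace_go_eq_pvStrip (fuel : Nat) (l acc : List Char) (h : l.length ≤ fuel) :
    PySem.Chars.replace.go ['(', ')'] [] fuel l acc = acc.reverse ++ pvStrip l := by
  induction fuel generalizing l acc with
  | zero =>
    have : l = [] := by cases l <;> simp_all
    subst this; simp [PySem.Chars.replace.go, pvStrip]
  | succ n ih =>
    match l with
    | [] => simp [PySem.Chars.replace.go, pvStrip]
    | c :: t =>
      by_cases hp : (['(', ')'] : List Char).isPrefixOf (c :: t) = true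
      · have hp' := hp
        cases t with
        | nil => simp [List.isPrefixOf] at hp'
        | cons d t' =>
          simp [List.isPrefixOf] at hp'
          obtain ⟨hc, hd⟩ := hp'
          subst hc; subst hd
          simp only [PySem.Chars.replace.go, hp, if_true]
          show PySem.Chars.replace.go ['(', ')'] [] n t' acc = _
          rw [ih t' acc (by simp at h; omega)]
          simp [pvStrip]
      · simp only [PySem.Chars.replace.go, hp, Bool.false_eq_true, if_false]
        rw [ih t (c :: acc) (by simp at h; omega)]
        cases t with
        | nil => simp [pvStrip]
        | cons d t' =>
          have hd : ¬ (c = '(' ∧ d = ')') := by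
            intro ⟨h1, h2⟩; exact hp (by simp [List.isPrefixOf, h1, h2])
          simp [pvStrip, hd]

theorem replace_eq_pvStrip (l : List Char) :
    PySem.Chars.replace l ['(', ')'] [] = pvStrip l := by
  simpa [PySem.Chars.replace] using replace_go_eq_pvStrip l.length l [] le_rfl

theorem pvStrip_length_lt (l : List Char) (h : ['(', ')'] <:+: l) :
    (pvStrip l).length < l.length := by
  induction l using pvStrip.induct with
  | case1 => simpa using h.length_le
  | case2 c => simpa using h.length_le
  | case3 c d t hcd ih =>
    have := pvStrip_length_le t
    simp [pvStrip, hcd]; omega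
  | case4 c d t hcd ih =>
    obtain ⟨u, v, hu⟩ := h
    have ht : ['(', ')'] <:+: d :: t := by
      cases u with
      | nil => simp at hu; exact absurd ⟨hu.1.symm, hu.2.1.symm⟩ hcd
      | cons x u' =>
        simp at hu
        exact ⟨u', v, by simpa using hu.2⟩
    have := ih ht
    simp only [List.length_cons] at this ⊢
    simp [pvStrip, hcd]; omega

-- B's while-loop: while "()" in s: s = s.replace("()", "")
def solutionAltLoop (l : List Char) : List Char :=
  if h : PySem.Chars.isIn ['(', ')'] l = true then
    solutionAltLoop (PySem.Chars.replace l ['(', ')'] [])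
  else l
termination_by l.length
decreasing_by
  rw [replace_eq_pvStrip]
  exact pvStrip_length_lt l ((PySem.Chars.isIn_iff_infix _ _).mp h)

def solution_alt (brackets : String) : Int :=
  let s := solutionAltLoop brackets.toList
  PySem.Int.floordiv (s.length : Int) 2

-- ===== PRECONDITION & SPEC =====
def Spec_solution (brackets : String) (out : Int) : Prop := out = solution_alt brackets
instance (brackets : String) (out : Int) : Decidable (Spec_solution brackets out) := by unfold Spec_solution; infer_instance

-- ===== CLAIM (what is proved, stated in full; the proofs are below) =====
def Claim_equal_solution : Prop := ∀ (brackets : String), Dom_solution brackets → Spec_solution brackets (solution brackets)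

-- ===== LEMMAS AND PROOFS =====

-- deleting the non-overlapping "()" occurrences of one replace pass leaves A's stack unchanged
theorem foldl_step_pvStrip (l : List Char) :
    ∀ S : List Char, l.foldl solutionStep S = (pvStrip l).foldl solutionStep S := by
  induction l using pvStrip.induct with
  | case1 => intro S; rfl
  | case2 c => intro S; rfl
  | case3 c d t hcd ih =>
    intro S
    obtain ⟨rfl, rfl⟩ := hcd
    have h1 : solutionStep S '(' = S ++ ['('] := by
      unfold solutionStep
      split_ifs with ha hb
      · rfl
      · exact absurd hb.2.1 (by decide)
      · rfl
    have h2 : solutionStep (S ++ ['(']) ')' = S := by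
      unfold solutionStep
      split_ifs with ha hb
      · simp at ha
      · simp
      · refine absurd ?_ hb; exact ⟨by simp, rfl, by simp⟩
    simp only [pvStrip, List.foldl, h1, h2]
    exact ih S
  | case4 c d t hcd ih =>
    intro S
    simp only [pvStrip, if_neg hcd, List.foldl]
    exact ih (solutionStep S c)

-- on a string with no "()" substring, A's stack just accumulates the characters
theorem foldl_step_no_infix (l : List Char) (h : ¬ ['(', ')'] <:+: l) :
    ∀ S : List Char, (S.getLast? = some '(' → l.head? ≠ some ')') →
      l.foldl solutionStep S = S ++ l := by
  induction l with
  | nil => intro S _; simp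
  | cons c t ih =>
    intro S hS
    have hstep : solutionStep S c = S ++ [c] := by
      unfold solutionStep
      split_ifs with ha hb
      · rfl
      · exact absurd (hS hb.2.2) (by simp [hb.2.1])
      · rfl
    have ht : ¬ ['(', ')'] <:+: t := fun hi => h (hi.trans (List.suffix_cons c t).isInfix)
    have hhd : (S ++ [c]).getLast? = some '(' → t.head? ≠ some ')' := by
      intro hlast hhead
      apply h
      cases t with
      | nil => simp at hhead
      | cons d t' =>
        simp at hhead hlast
        exact ⟨[], t', by simp [hlast, hhead]⟩
    rw [List.foldl_cons, hstep, ih ht (S ++ [c]) hhd, List.append_assoc]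
    rfl

-- the loop's result carries no "()" and has A's stack value
theorem solutionAltLoop_no_isIn (l : List Char) :
    PySem.Chars.isIn ['(', ')'] (solutionAltLoop l) = false := by
  induction l using solutionAltLoop.induct with
  | case1 l h ih => rw [solutionAltLoop, dif_pos h]; exact ih
  | case2 l h => rw [solutionAltLoop, dif_neg h]; exact Bool.eq_false_iff.mpr h

theorem solutionAltLoop_foldl (l : List Char) :
    l.foldl solutionStep [] = (solutionAltLoop l).foldl solutionStep [] := by
  induction l using solutionAltLoop.induct with
  | case1 l h ih =>
    rw [solutionAltLoop, dif_pos h, ← ih, replace_eq_pvStrip]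
    exact foldl_step_pvStrip l []
  | case2 l h => rw [solutionAltLoop, dif_neg h]

theorem foldl_step_eq_loop (l : List Char) :
    l.foldl solutionStep [] = solutionAltLoop l := by
  rw [solutionAltLoop_foldl l]
  have hno : ¬ ['(', ')'] <:+: solutionAltLoop l := by
    have := solutionAltLoop_no_isIn l
    exact (PySem.Chars.isIn_eq_false_iff _ _).mp this
  simpa using foldl_step_no_infix (solutionAltLoop l) hno [] (by simp)

-- ===== VERDICT (by name: the statement is the Claim_ definition above) =====
theorem solution_spec : Claim_equal_solution := by
  intro brackets _
  unfold Spec_solution solution solution_alt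
  rw [foldl_step_eq_loop]
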